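-- pv_equiv track=rewrite | github.com/MaximShoustin/Workout | workout_planner.py | get_station_equipment_requirements
-- ===== SOURCE A (Python) =====
-- def get_station_equipment_requirements(step_equipments: list, people_per_station: int = 1) -> dict:
--     """
--     Calculate equipment requirements for a single station with N steps.
--
--     The calculation depends on whether exercises happen simultaneously or sequentially:
--     - If people_per_station > 1: All steps happen simultaneously (need sum of all step equipment)
--     - If people_per_station = 1: All steps are sequential (need MAX of all step equipment)
--
--     Args:
--         step_equipments: List of equipment dicts for each step [step1_equipment, step2_equipment, ...]
--         people_per_station: Number of people assigned to this station
--
--     Returns: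
--         Dict with equipment requirements for the station
--     """
--     if not step_equipments:
--         return {}
--
--     station_requirements = {}
--
--     # Get all equipment types from all steps
--     all_equipment_types = set()
--     for step_equipment in step_equipments:
--         all_equipment_types.update(step_equipment.keys())
--
--     for equipment_type in all_equipment_types:
--         step_counts = []
--         for step_equipment in step_equipments:
--             count = step_equipment.get(equipment_type, {}).get("count", 0)
--             step_counts.append(count)
--
--         if people_per_station > 1:
--             # Multiple people per station: all steps happen simultaneously
--             # Need equipment for all exercises at the same time
--             required_count = sum(step_counts)
--         else:
--             # Single person per station: all steps are sequential
--             # Need the maximum of all exercises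
--             required_count = max(step_counts) if step_counts else 0
--
--         if required_count > 0:
--             station_requirements[equipment_type] = {"count": required_count}
--
--     return station_requirements
-- ===== SOURCE B (Python) =====
-- def get_station_equipment_requirements(step_equipments: list, people_per_station: int = 1) -> dict:
--     """Single pass over all step-equipment entries, accumulating sum (simultaneous)
--     or max (sequential) per equipment type in one dict; then keep positive counts."""
--     if not step_equipments:
--         return {}
--     use_sum = people_per_station > 1
--     acc = {}
--     for step_equipment in step_equipments:
--         for equipment_type, info in step_equipment.items():
--             count = info.get("count", 0)
--             acc[equipment_type] = (
--                 (acc[equipment_type] + count if use_sum else max(acc[equipment_type], count))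
--                 if equipment_type in acc else count
--             )
--     return {t: {"count": v} for t, v in acc.items() if v > 0}
-- ===== Notes on version B (the rewrite author's own statement) =====
-- stated objective: faster
-- what changed: A first collects the set of all equipment types and then rescans every step per type (with a sum or a max over per-step counts); B makes one pass over all step entries, accumulating the sum or running max per equipment type in a single dict, then keeps the positive totals. Pre_ only requires each step's association-list encoding to have distinct keys, which every real Python dict input satisfies.
import Mathlib
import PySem

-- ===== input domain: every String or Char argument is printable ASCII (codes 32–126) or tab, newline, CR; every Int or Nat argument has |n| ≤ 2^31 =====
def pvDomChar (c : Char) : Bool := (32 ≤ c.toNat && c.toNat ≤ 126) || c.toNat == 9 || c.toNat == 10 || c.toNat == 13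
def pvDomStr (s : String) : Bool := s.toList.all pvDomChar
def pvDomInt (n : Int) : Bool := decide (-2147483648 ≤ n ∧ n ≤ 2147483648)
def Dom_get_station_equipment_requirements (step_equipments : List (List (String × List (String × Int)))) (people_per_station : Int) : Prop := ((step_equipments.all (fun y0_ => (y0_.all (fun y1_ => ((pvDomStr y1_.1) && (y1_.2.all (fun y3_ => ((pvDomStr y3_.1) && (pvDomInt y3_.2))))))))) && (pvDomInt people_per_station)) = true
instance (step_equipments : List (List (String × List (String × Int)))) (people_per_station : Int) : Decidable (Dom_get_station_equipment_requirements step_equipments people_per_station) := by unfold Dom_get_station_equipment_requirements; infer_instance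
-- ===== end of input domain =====

-- B replaces A's (equipment types × steps) double scan by a single pass over all step entries,
-- accumulating sum/max per equipment type in one dict.

-- ===== PORT A =====
-- literal port of A; station_requirements is a dict whose keys (drawn from a set) are distinct,
-- so each insertion appends a fresh item.
def get_station_equipment_requirements (step_equipments : List (List (String × List (String × Int)))) (people_per_station : Int) : List (String × List (String × Int)) :=
  if step_equipments = [] then []
  else
    let all_equipment_types : PySem.Set String :=
      step_equipments.foldl (fun s step_equipment => PySem.Set.update s (PySem.Dict.mk step_equipment).keys) PySem.Set.empty
    all_equipment_types.foldl (fun station_requirements equipment_type =>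
      let step_counts : List Int := step_equipments.map (fun step_equipment =>
        PySem.Dict.getD (PySem.Dict.mk (PySem.Dict.getD (PySem.Dict.mk step_equipment) equipment_type [])) "count" 0)
      let required_count : Int :=
        if people_per_station > 1 then step_counts.sum
        else match step_counts with          -- max(step_counts) if step_counts else 0
          | [] => 0
          | c :: cs => cs.foldl max c        -- Python max of a nonempty int list = its maximum value (exact)
      if required_count > 0 then station_requirements ++ [(equipment_type, [("count", required_count)])]
      else station_requirements) []

-- ===== PORT B =====
-- literal port of Source B; `for t, info in step.items()` iterates the step dict's pairs, which under
-- Pre_ (distinct keys per step, as every Python dict has) is exactly the association list.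
def get_station_equipment_requirements_alt (step_equipments : List (List (String × List (String × Int)))) (people_per_station : Int) : List (String × List (String × Int)) :=
  if step_equipments = [] then []
  else
    let use_sum : Bool := decide (people_per_station > 1)
    let acc : PySem.Dict String Int :=
      step_equipments.foldl (fun acc step_equipment =>
        step_equipment.foldl (fun acc p =>
          acc.insert p.1
            (if acc.contains p.1 then
              (if use_sum then acc.getD p.1 0 + PySem.Dict.getD (PySem.Dict.mk p.2) "count" 0
               else max (acc.getD p.1 0) (PySem.Dict.getD (PySem.Dict.mk p.2) "count" 0))
             else PySem.Dict.getD (PySem.Dict.mk p.2) "count" 0)) acc) PySem.Dict.empty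
    (acc.items.filter (fun q => q.2 > 0)).map (fun q => (q.1, [("count", q.2)]))

-- ===== PRECONDITION & SPEC =====
-- Pre_ requires each step's association list to carry pairwise-distinct keys — every real Python
-- dict does, so this excludes no Python input; duplicate keys in the list encoding have no dict counterpart.
def Pre_get_station_equipment_requirements (step_equipments : List (List (String × List (String × Int)))) (people_per_station : Int) : Prop :=
  ∀ step ∈ step_equipments, (step.map Prod.fst).Nodup
instance (step_equipments : List (List (String × List (String × Int)))) (people_per_station : Int) : Decidable (Pre_get_station_equipment_requirements step_equipments people_per_station) := by unfold Pre_get_station_equipment_requirements; infer_instance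
def pvWitness_get_station_equipment_requirements : (List (List (String × List (String × Int)))) × Int :=
  ([[("a", [("count", 2)])], [("a", [("count", 1)]), ("b", [("count", -1)])]], 1)

def Spec_get_station_equipment_requirements (step_equipments : List (List (String × List (String × Int)))) (people_per_station : Int) (out : List (String × List (String × Int))) : Prop := out = get_station_equipment_requirements_alt step_equipments people_per_station
instance (step_equipments : List (List (String × List (String × Int)))) (people_per_station : Int) (out : List (String × List (String × Int))) : Decidable (Spec_get_station_equipment_requirements step_equipments people_per_station out) := by unfold Spec_get_station_equipment_requirements; infer_instance

-- ===== CLAIM (what is proved, stated in full; the proofs are below) =====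
def Claim_equal_get_station_equipment_requirements : Prop := ∀ (step_equipments : List (List (String × List (String × Int)))) (people_per_station : Int), Dom_get_station_equipment_requirements step_equipments people_per_station → Pre_get_station_equipment_requirements step_equipments people_per_station → Spec_get_station_equipment_requirements step_equipments people_per_station (get_station_equipment_requirements step_equipments people_per_station)

-- ===== LEMMAS AND PROOFS =====

-- count read from one inner equipment-info dict
def pvCntI (info : List (String × Int)) : Int := PySem.Dict.getD (PySem.Dict.mk info) "count" 0
-- A's per-step count for one equipment type (0 when the step lacks it)
def pvCntA (t : String) (step : List (String × List (String × Int))) : Int :=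
  PySem.Dict.getD (PySem.Dict.mk (PySem.Dict.getD (PySem.Dict.mk step) t [])) "count" 0
-- B's loop body over one (type, info) entry
def pvG (b : Bool) (acc : PySem.Dict String Int) (p : String × List (String × Int)) : PySem.Dict String Int :=
  acc.insert p.1
    (if acc.contains p.1 then
      (if b then acc.getD p.1 0 + pvCntI p.2 else max (acc.getD p.1 0) (pvCntI p.2))
     else pvCntI p.2)
-- running combine of B's accumulator value at one key
def pvCombO (b : Bool) (o : Option Int) (cs : List Int) : Option Int :=
  cs.foldl (fun o c => some (match o with | none => c | some v => if b then v + c else max v c)) o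
-- the counts B actually sees for type t: in entry order, one per step entry keyed t
def pvE (t : String) (steps : List (List (String × List (String × Int)))) : List Int :=
  (steps.flatten.filter (fun p => p.1 == t)).map (fun p => pvCntI p.2)

theorem pvG_get? (b : Bool) (l : List (String × List (String × Int))) (d : PySem.Dict String Int) (t : String) :
    (l.foldl (pvG b) d).get? t = pvCombO b (d.get? t) ((l.filter (fun p => p.1 == t)).map (fun p => pvCntI p.2)) := by
  induction l generalizing d with
  | nil => rfl
  | cons p l ih =>
    simp only [List.foldl_cons, List.filter_cons]
    by_cases h : p.1 = t
    · simp only [h, beq_self_eq_true, if_pos, List.map_cons]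
      rw [ih]
      have hins : (pvG b d p).get? t = some (match d.get? t with
          | none => pvCntI p.2
          | some v => if b then v + pvCntI p.2 else max v (pvCntI p.2)) := by
        unfold pvG
        rw [h, PySem.Dict.get?_insert_self]
        rw [PySem.Dict.contains_eq_isSome_get?, PySem.Dict.getD_eq_get?_getD]
        cases d.get? t <;> simp
      rw [hins]
      cases hd : d.get? t <;> simp [pvCombO]
    · have hbeq : (p.1 == t) = false := by simp [h]
      simp only [hbeq, Bool.false_eq_true, if_neg, not_false_iff]
      rw [ih]
      have : (pvG b d p).get? t = d.get? t := by
        unfold pvG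
        exact PySem.Dict.get?_insert_of_ne d _ (fun hc => h hc.symm)
      rw [this]

theorem pvG_keys (b : Bool) (l : List (String × List (String × Int))) :
    (l.foldl (pvG b) PySem.Dict.empty).keys = PySem.Set.ofList (l.map Prod.fst) :=
  PySem.Dict.keys_foldl_insert_key l Prod.fst
    (fun acc p => (if acc.contains p.1 then
      (if b then acc.getD p.1 0 + pvCntI p.2 else max (acc.getD p.1 0) (pvCntI p.2))
     else pvCntI p.2)) PySem.Dict.empty

theorem pvA_keys (steps : List (List (String × List (String × Int)))) :
    steps.foldl (fun s step => PySem.Set.update s (PySem.Dict.mk step).keys) PySem.Set.empty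
      = PySem.Set.ofList (steps.flatten.map Prod.fst) := by
  show _ = (steps.flatten.map Prod.fst).foldl PySem.Set.add []
  rw [List.map_flatten, List.foldl_flatten, List.foldl_map]
  rfl

theorem pvCombO_some (b : Bool) (v : Int) (cs : List Int) :
    pvCombO b (some v) cs = some (if b then v + cs.sum else cs.foldl max v) := by
  induction cs generalizing v with
  | nil => simp [pvCombO]
  | cons c cs ih =>
    cases b <;> simp only [pvCombO, List.foldl_cons] at * <;> rw [ih] <;> simp [List.sum_cons, add_assoc]

theorem pvCntA_of_not_contains (t : String) (step : List (String × List (String × Int)))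
    (h : (PySem.Dict.mk step).contains t = false) : pvCntA t step = 0 := by
  unfold pvCntA
  rw [PySem.Dict.getD_of_not_contains _ _ h]
  rfl

theorem pvStep_filter (t : String) (step : List (String × List (String × Int)))
    (hnd : (step.map Prod.fst).Nodup) :
    (step.filter (fun p => p.1 == t)).map (fun p => pvCntI p.2)
      = if (PySem.Dict.mk step).contains t then [pvCntA t step] else [] := by
  induction step with
  | nil => rfl
  | cons p rest ih =>
    obtain ⟨k, info⟩ := p
    simp only [List.map_cons, List.nodup_cons] at hnd
    by_cases h : k = t
    · subst h
      have hfil : rest.filter (fun q => q.1 == k) = [] := by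
        rw [List.filter_eq_nil_iff]
        intro q hq hbq
        exact hnd.1 (by rw [← eq_of_beq hbq]; exact List.mem_map_of_mem hq)
      have hcon : (PySem.Dict.mk ((k, info) :: rest)).contains k = true := by
        simp [PySem.Dict.contains_mk]
      have hget : pvCntA k ((k, info) :: rest) = pvCntI info := by
        unfold pvCntA pvCntI
        have h1 : (PySem.Dict.mk ((k, info) :: rest)).getD k [] = info := by
          rw [PySem.Dict.getD_eq_get?_getD, PySem.Dict.get?_mk_cons]; simp
        rw [h1]
      simp [hfil, hcon, hget]
    · have hc : (PySem.Dict.mk ((k, info) :: rest)).contains t = (PySem.Dict.mk rest).contains t := by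
        simp [PySem.Dict.contains_eq_isSome_get?, PySem.Dict.get?_mk_cons, h]
      have hg : pvCntA t ((k, info) :: rest) = pvCntA t rest := by
        unfold pvCntA
        have h1 : (PySem.Dict.mk ((k, info) :: rest)).getD t [] = (PySem.Dict.mk rest).getD t [] := by
          rw [PySem.Dict.getD_eq_get?_getD, PySem.Dict.get?_mk_cons, PySem.Dict.getD_eq_get?_getD]
          simp [h]
        rw [h1]
      have hbeq : (k == t) = false := by simp [h]
      simp only [List.filter_cons, hbeq, Bool.false_eq_true, if_neg, not_false_iff, hc, hg]
      exact ih hnd.2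

theorem pvE_cons (t : String) (s : List (String × List (String × Int))) (rest) :
    pvE t (s :: rest) = (s.filter (fun p => p.1 == t)).map (fun p => pvCntI p.2) ++ pvE t rest := by
  simp [pvE, List.filter_append]

theorem pvE_sum (t : String) (steps : List (List (String × List (String × Int))))
    (hpre : ∀ step ∈ steps, (step.map Prod.fst).Nodup) :
    (pvE t steps).sum = (steps.map (pvCntA t)).sum := by
  induction steps with
  | nil => rfl
  | cons s rest ih =>
    rw [pvE_cons, List.sum_append, pvStep_filter t s (hpre s (by simp)),
        ih (fun st hst => hpre st (by simp [hst])), List.map_cons, List.sum_cons]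
    by_cases hc : (PySem.Dict.mk s).contains t = true
    · simp [hc]
    · simp only [Bool.not_eq_true] at hc
      simp [hc, pvCntA_of_not_contains t s hc]

theorem pvE_mem1 (t : String) (steps) (hpre : ∀ step ∈ steps, (step.map Prod.fst).Nodup)
    (x : Int) (hx : x ∈ pvE t steps) : x ∈ steps.map (pvCntA t) := by
  induction steps with
  | nil => simp [pvE] at hx
  | cons s rest ih =>
    rw [pvE_cons, List.mem_append, pvStep_filter t s (hpre s (by simp))] at hx
    rcases hx with hx | hx
    · split at hx <;> simp_all
    · exact List.mem_cons_of_mem _ (ih (fun st hst => hpre st (by simp [hst])) hx)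

theorem pvE_mem2 (t : String) (steps) (hpre : ∀ step ∈ steps, (step.map Prod.fst).Nodup)
    (x : Int) (hx : x ∈ steps.map (pvCntA t)) : x ∈ pvE t steps ∨ x = 0 := by
  induction steps with
  | nil => simp at hx
  | cons s rest ih =>
    rw [List.map_cons, List.mem_cons] at hx
    rw [pvE_cons, pvStep_filter t s (hpre s (by simp))]
    rcases hx with hx | hx
    · by_cases hc : (PySem.Dict.mk s).contains t = true
      · left; simp [hc, hx]
      · simp only [Bool.not_eq_true] at hc
        right; rw [hx]; exact pvCntA_of_not_contains t s hc
    · rcases ih (fun st hst => hpre st (by simp [hst])) hx with h | h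
      · left; simp [h]
      · right; exact h

theorem pvE_ne_nil (t : String) (steps) (ht : t ∈ steps.flatten.map Prod.fst) :
    pvE t steps ≠ [] := by
  rw [List.mem_map] at ht
  obtain ⟨p, hp, hpt⟩ := ht
  exact List.ne_nil_of_mem (List.mem_map_of_mem (List.mem_filter.mpr ⟨hp, by simp [hpt]⟩))

-- max characterisation of a nonempty fold
theorem pvFoldMax_spec (c : Int) (cs : List Int) :
    cs.foldl max c ∈ (c :: cs) ∧ ∀ x ∈ (c :: cs), x ≤ cs.foldl max c := by
  have h : (c :: cs).max? = some (cs.foldl max c) := rfl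
  exact List.max?_eq_some_iff.mp h

theorem pvFilterMapCongr {α β : Type} (K : List α) (p q : α → Bool) (f g : α → β)
    (h1 : ∀ t ∈ K, p t = q t) (h2 : ∀ t ∈ K, q t = true → f t = g t) :
    (K.filter p).map f = (K.filter q).map g := by
  rw [List.filter_congr h1]
  exact List.map_congr_left (fun t htf =>
    h2 t (List.mem_filter.mp htf).1 (List.mem_filter.mp htf).2)

theorem pvFoldA (f : String → Int) (K : List String) :
    K.foldl (fun acc t => if f t > 0 then acc ++ [(t, [("count", f t)])] else acc)
      ([] : List (String × List (String × Int)))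
      = (K.filter (fun t => decide (f t > 0))).map (fun t => (t, [("count", f t)])) := by
  have h := PySem.List.foldl_append_if (fun t => decide (f t > 0))
    (fun t => ((t : String), [(("count" : String), f t)])) K []
  simpa using h

-- ===== VERDICT (by name: the statement is the Claim_ definition above) =====
-- relation between A's max over all steps (0 for absent) and B's max over present entries
theorem pvPoint_max (t : String) (steps : List (List (String × List (String × Int))))
    (hpre : ∀ step ∈ steps, (step.map Prod.fst).Nodup)
    (c : Int) (cs : List Int) (hL : steps.map (pvCntA t) = c :: cs)
    (e : Int) (es : List Int) (hE : pvE t steps = e :: es) :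
    ((cs.foldl max c > 0) ↔ (es.foldl max e > 0)) ∧ (es.foldl max e > 0 → cs.foldl max c = es.foldl max e) := by
  obtain ⟨hgmem, hgbd⟩ := pvFoldMax_spec e es
  obtain ⟨hfmem, hfbd⟩ := pvFoldMax_spec c cs
  rw [← hE] at hgmem hgbd
  rw [← hL] at hfmem hfbd
  set fv := cs.foldl max c
  set gv := es.foldl max e
  have hgf : gv ≤ fv := hfbd gv (pvE_mem1 t steps hpre gv hgmem)
  have hfEor : fv ∈ pvE t steps ∨ fv = 0 := pvE_mem2 t steps hpre fv hfmem
  constructor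
  · constructor
    · intro hfpos
      rcases hfEor with hfE | hf0
      · exact lt_of_lt_of_le hfpos (hgbd fv hfE)
      · omega
    · intro hgpos; omega
  · intro hgpos
    rcases hfEor with hfE | hf0
    · exact le_antisymm (hgbd fv hfE) hgf
    · omega

-- ===== VERDICT (by name: the statement is the Claim_ definition above) =====
theorem get_station_equipment_requirements_spec : Claim_equal_get_station_equipment_requirements := by
  intro steps people _ hpre
  unfold Spec_get_station_equipment_requirements
  by_cases hs : steps = []
  · subst hs; rfl
  · simp only [get_station_equipment_requirements, get_station_equipment_requirements_alt, if_neg hs]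
    rw [pvA_keys, pvFoldA]
    -- B side: nested fold over steps = fold over flattened entries
    have hBfold : steps.foldl (fun acc step_equipment =>
        step_equipment.foldl (fun acc p =>
          acc.insert p.1
            (if acc.contains p.1 then
              (if decide (people > 1) then acc.getD p.1 0 + PySem.Dict.getD (PySem.Dict.mk p.2) "count" 0
               else max (acc.getD p.1 0) (PySem.Dict.getD (PySem.Dict.mk p.2) "count" 0))
             else PySem.Dict.getD (PySem.Dict.mk p.2) "count" 0)) acc) PySem.Dict.empty
        = steps.flatten.foldl (pvG (decide (people > 1))) PySem.Dict.empty := by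
      rw [List.foldl_flatten]
      rfl
    rw [hBfold]
    set bb := decide (people > 1) with hbb
    set acc := steps.flatten.foldl (pvG bb) PySem.Dict.empty with hacc
    have hkeys : acc.keys = PySem.Set.ofList (steps.flatten.map Prod.fst) := by
      rw [hacc]; exact pvG_keys bb steps.flatten
    have hnd : acc.keys.Nodup := by rw [hkeys]; exact PySem.Set.nodup_ofList _
    rw [PySem.Dict.items_eq_map_keys acc hnd 0, hkeys, List.filter_map, List.map_map]
    apply pvFilterMapCongr
    · intro t ht
      have ht' : t ∈ steps.flatten.map Prod.fst := (PySem.Set.mem_ofList _ _).mp ht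
      obtain ⟨e, es, hE⟩ := List.exists_cons_of_ne_nil (pvE_ne_nil t steps ht')
      simp only [Function.comp]
      by_cases hp : people > 1
      · have hb : bb = true := by rw [hbb]; simp [hp]
        have hgetD : acc.getD t 0 = (pvE t steps).sum := by
          rw [PySem.Dict.getD_eq_get?_getD, hacc, pvG_get?]
          show (pvCombO bb none (pvE t steps)).getD 0 = _
          rw [hE]
          show (pvCombO bb (some e) es).getD 0 = _
          rw [pvCombO_some, hb]
          simp
        simp only [if_pos hp]
        show decide ((steps.map (pvCntA t)).sum > 0) = decide (acc.getD t 0 > 0)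
        rw [hgetD, pvE_sum t steps hpre]
      · have hb : bb = false := by rw [hbb]; simp [hp]
        have hgetD : acc.getD t 0 = es.foldl max e := by
          rw [PySem.Dict.getD_eq_get?_getD, hacc, pvG_get?]
          show (pvCombO bb none (pvE t steps)).getD 0 = _
          rw [hE]
          show (pvCombO bb (some e) es).getD 0 = _
          rw [pvCombO_some, hb]
          simp
        simp only [if_neg hp]
        obtain ⟨s, rest, rfl⟩ := List.exists_cons_of_ne_nil hs
        simp only [List.map_cons]
        obtain ⟨hiff, _⟩ := pvPoint_max t (s :: rest) hpre
          (pvCntA t s) (rest.map (pvCntA t)) rfl e es hE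
        show decide ((rest.map (pvCntA t)).foldl max (pvCntA t s) > 0) = decide (acc.getD t 0 > 0)
        rw [hgetD]
        exact decide_eq_decide.mpr hiff
    · intro t ht hq
      have ht' : t ∈ steps.flatten.map Prod.fst := (PySem.Set.mem_ofList _ _).mp ht
      obtain ⟨e, es, hE⟩ := List.exists_cons_of_ne_nil (pvE_ne_nil t steps ht')
      simp only [Function.comp] at hq ⊢
      by_cases hp : people > 1
      · have hb : bb = true := by rw [hbb]; simp [hp]
        have hgetD : acc.getD t 0 = (pvE t steps).sum := by
          rw [PySem.Dict.getD_eq_get?_getD, hacc, pvG_get?]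
          show (pvCombO bb none (pvE t steps)).getD 0 = _
          rw [hE]
          show (pvCombO bb (some e) es).getD 0 = _
          rw [pvCombO_some, hb]
          simp
        simp only [if_pos hp]
        show ((t : String), [(("count" : String), (steps.map (pvCntA t)).sum)]) = (t, [("count", acc.getD t 0)])
        rw [hgetD, pvE_sum t steps hpre]
      · have hb : bb = false := by rw [hbb]; simp [hp]
        have hgetD : acc.getD t 0 = es.foldl max e := by
          rw [PySem.Dict.getD_eq_get?_getD, hacc, pvG_get?]
          show (pvCombO bb none (pvE t steps)).getD 0 = _
          rw [hE]
          show (pvCombO bb (some e) es).getD 0 = _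
          rw [pvCombO_some, hb]
          simp
        simp only [if_neg hp]
        obtain ⟨s, rest, rfl⟩ := List.exists_cons_of_ne_nil hs
        simp only [List.map_cons]
        obtain ⟨_, heq⟩ := pvPoint_max t (s :: rest) hpre
          (pvCntA t s) (rest.map (pvCntA t)) rfl e es hE
        have hgpos : es.foldl max e > 0 := by
          have hq' : acc.getD t 0 > 0 := by simpa using hq
          rwa [hgetD] at hq'

        show ((t : String), [(("count" : String), (rest.map (pvCntA t)).foldl max (pvCntA t s))]) = (t, [("count", acc.getD t 0)])
        rw [hgetD, heq hgpos]
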